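-- pv_equiv track=rewrite | github.com/K1ju02/AdventOfCode2021 | day12/puz2.py | check_small
-- ===== SOURCE A (Python) =====
-- def check_small(path):
--     lower = []
--     for n in path:
--         if not n.isupper():
--             if n in lower:
--                 return False
--             lower += [n]
--     return True
-- ===== SOURCE B (Python) =====
-- def check_small(path):
--     lowers = [n for n in path if not n.isupper()]
--     return len(lowers) == len(set(lowers))
-- ===== Notes on version B (the rewrite author's own statement) =====
-- stated objective: simpler
-- what changed: Replaces the incremental seen-list scan with early return by a single filter of the non-uppercase nodes followed by one cardinality comparison len(lowers) == len(set(lowers)), with no per-element membership test and no early return.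
import Mathlib
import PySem

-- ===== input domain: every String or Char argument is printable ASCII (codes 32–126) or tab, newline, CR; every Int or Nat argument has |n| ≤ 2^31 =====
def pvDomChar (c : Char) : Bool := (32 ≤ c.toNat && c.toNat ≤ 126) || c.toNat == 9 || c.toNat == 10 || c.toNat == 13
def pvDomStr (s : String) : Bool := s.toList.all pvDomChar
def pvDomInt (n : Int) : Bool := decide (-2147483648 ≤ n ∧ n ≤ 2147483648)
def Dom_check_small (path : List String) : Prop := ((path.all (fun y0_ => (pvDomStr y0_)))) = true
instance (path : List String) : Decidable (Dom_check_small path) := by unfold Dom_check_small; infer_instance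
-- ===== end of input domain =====

-- B replaces A's incremental seen-list scan (with early return) by one filter pass
-- plus a single cardinality comparison against the dedup set; objective: simpler.


-- hand port of Python str.isupper (exact on ASCII, the stated domain):
-- at least one cased character and no lowercase character
def pyIsupper (s : String) : Bool :=
  s.toList.any PySem.Chars.isupper && s.toList.all (fun c => !PySem.Chars.islower c)

-- ===== PORT A =====
def checkSmallLoop (lower : List String) : List String → Bool
  | [] => true
  | n :: rest =>
    if !pyIsupper n then
      if lower.contains n then false
      else checkSmallLoop (lower ++ [n]) rest
    else checkSmallLoop lower rest

def check_small (path : List String) : Bool := checkSmallLoop [] path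

-- ===== PORT B =====
def check_small_alt (path : List String) : Bool :=
  let lowers := path.filter (fun n => !pyIsupper n)
  lowers.length == (PySem.Set.ofList lowers).length

-- ===== PRECONDITION & SPEC =====
def Spec_check_small (path : List String) (out : Bool) : Prop := out = check_small_alt path
instance (path : List String) (out : Bool) : Decidable (Spec_check_small path out) := by unfold Spec_check_small; infer_instance

-- ===== CLAIM (what is proved, stated in full; the proofs are below) =====
def Claim_equal_check_small : Prop := ∀ (path : List String), Dom_check_small path → Spec_check_small path (check_small path)

-- ===== LEMMAS AND PROOFS =====

-- A's loop returns true iff the remaining non-uppercase nodes are distinct and avoid the seen list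
lemma checkSmallLoop_iff (rest lower : List String) :
    checkSmallLoop lower rest = true ↔
      ((rest.filter (fun n => !pyIsupper n)).Nodup ∧
        ∀ x ∈ rest.filter (fun n => !pyIsupper n), x ∉ lower) := by
  induction rest generalizing lower with
  | nil => simp [checkSmallLoop]
  | cons n rest ih =>
    by_cases hu : pyIsupper n
    · simp [checkSmallLoop, hu, ih]
    · by_cases hm : n ∈ lower
      · simp only [checkSmallLoop, hu, Bool.not_false, if_true,
          List.contains_iff_mem.mpr hm, if_true]
        simp [hu, hm]
      · have hc : lower.contains n = false := by
          simp [hm]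
        simp only [checkSmallLoop, hu, Bool.not_false, if_true, hc, Bool.false_eq_true,
          if_false, ih]
        simp only [List.filter_cons, hu, Bool.not_false, if_true, List.nodup_cons,
          List.mem_cons, List.mem_append]
        constructor
        · rintro ⟨hnd, hall⟩
          refine ⟨⟨fun h => hall n h (Or.inr (Or.inl rfl)), hnd⟩, ?_⟩
          rintro x (rfl | hx)
          · exact hm
          · exact fun hl => hall x hx (Or.inl hl)
        · rintro ⟨⟨hn, hnd⟩, hall⟩
          refine ⟨hnd, fun x hx => ?_⟩
          rintro (hl | rfl | hnil)
          · exact hall x (Or.inr hx) hl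
          · exact hn hx
          · exact List.not_mem_nil hnil

-- the dedup set has the list's length iff the list has no duplicates
lemma length_ofList_eq_iff (l : List String) :
    (PySem.Set.ofList l).length = l.length ↔ l.Nodup := by
  induction l using List.reverseRecOn with
  | nil => exact ⟨fun _ => List.nodup_nil, fun _ => rfl⟩
  | append_singleton l x ih =>
    have hsplit : PySem.Set.ofList (l ++ [x]) = PySem.Set.add (PySem.Set.ofList l) x := by
      rw [PySem.Set.ofList_eq_foldl, PySem.Set.ofList_eq_foldl, List.foldl_append,
        List.foldl_cons, List.foldl_nil]
    by_cases hx : x ∈ l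
    · have hcon : (PySem.Set.ofList l).contains x = true := by
        rw [PySem.Set.contains_iff, PySem.Set.mem_ofList]; exact hx
      have hle := PySem.Set.length_ofList_le (xs := l)
      simp only [hsplit, PySem.Set.add, hcon, if_true, List.length_append,
        List.length_singleton, List.nodup_append]
      constructor
      · intro h; omega
      · rintro ⟨-, -, hd⟩
        exact (hd x hx x (List.mem_singleton_self x) rfl).elim
    · have hcon : (PySem.Set.ofList l).contains x = false := by
        rw [Bool.eq_false_iff]
        intro h
        exact hx ((PySem.Set.mem_ofList _ _).mp ((PySem.Set.contains_iff _ _).mp h))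
      simp only [hsplit, PySem.Set.add, hcon, Bool.false_eq_true, if_false,
        List.length_append, List.length_singleton]
      rw [List.nodup_append]
      constructor
      · intro h
        refine ⟨ih.mp (by omega), by simp, ?_⟩
        intro a ha b hb
        rw [List.mem_singleton] at hb; subst hb
        exact fun h' => hx (h' ▸ ha)
      · rintro ⟨hnd, -, -⟩
        have := ih.mpr hnd
        omega

-- ===== VERDICT (by name: the statement is the Claim_ definition above) =====
theorem check_small_spec : Claim_equal_check_small := by
  intro path _
  unfold Spec_check_small check_small check_small_alt
  rw [Bool.eq_iff_iff, checkSmallLoop_iff]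
  simp only [beq_iff_eq, List.not_mem_nil, not_false_iff, implies_true, and_true]
  exact ⟨fun h => ((length_ofList_eq_iff _).mpr h).symm,
         fun h => (length_ofList_eq_iff _).mp h.symm⟩
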